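-- pv_equiv track=rewrite | github.com/nat-160/Advent-of-Code-2024 | day14.py | possibleTree
-- ===== SOURCE A (Python) =====
-- def possibleTree(floor):
--     for f in floor:
--         best_consecutive, consecutive = 0, 0
--         for n in f:
--             if n == 0:
--                 consecutive = 0
--             else:
--                 consecutive += 1
--                 best_consecutive = max(best_consecutive, consecutive)
--         if best_consecutive > 7: # arbitrary number
--             return True
--     return False
-- ===== SOURCE B (Python) =====
-- def possibleTree(floor):
--     def has_long_run(f):
--         if not f:
--             return False
--         if f[0] == 0:
--             return has_long_run(f[1:])
--         run = 0
--         while run < len(f) and f[run] != 0: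
--             run += 1
--         return run > 7 or has_long_run(f[run:])
--     return any(map(has_long_run, floor))
-- ===== Notes on version B (the rewrite author's own statement) =====
-- stated objective: alternative
-- what changed: Replaces the running consecutive/best-consecutive counter pair per row by a run-splitting recursion that skips zeros, measures each maximal nonzero run directly and checks it against 7, short-circuiting via any().
import Mathlib
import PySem

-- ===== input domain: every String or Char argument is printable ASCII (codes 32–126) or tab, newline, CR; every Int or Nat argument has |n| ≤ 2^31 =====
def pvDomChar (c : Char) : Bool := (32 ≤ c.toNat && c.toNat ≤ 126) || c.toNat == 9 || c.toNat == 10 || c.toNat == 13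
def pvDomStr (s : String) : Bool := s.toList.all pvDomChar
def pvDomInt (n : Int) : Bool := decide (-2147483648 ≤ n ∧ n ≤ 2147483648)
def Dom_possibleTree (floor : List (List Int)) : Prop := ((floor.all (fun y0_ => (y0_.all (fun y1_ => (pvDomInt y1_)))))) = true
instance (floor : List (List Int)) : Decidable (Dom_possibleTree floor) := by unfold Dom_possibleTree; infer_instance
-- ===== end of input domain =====

-- B replaces A's running consecutive/best-consecutive counters by a run-splitting
-- recursion that measures each maximal nonzero run directly (alternative decomposition).
-- ===== PORT A =====
def possibleTree : List (List Int) → Bool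
  | [] => false
  | f :: rest =>
    let p := f.foldl
      (fun (p : Int × Int) n =>
        if n = 0 then (p.1, 0) else (max p.1 (p.2 + 1), p.2 + 1))
      (0, 0)
    if p.1 > 7 then true else possibleTree rest

-- ===== PORT B =====
-- has_long_run: the inner while loop computes run = length of the maximal leading
-- nonzero run, i.e. (takeWhile (· ≠ 0)).length; f[run:] is drop run.
def hasLongRun : List Int → Bool
  | [] => false
  | n :: t =>
    if h : n = 0 then hasLongRun t
    else
      let run := ((n :: t).takeWhile (fun x => x ≠ 0)).length
      decide (run > 7) || hasLongRun ((n :: t).drop run)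
termination_by f => f.length
decreasing_by
  · simp
  · simp [h, List.length_drop]

def possibleTree_alt (floor : List (List Int)) : Bool :=
  floor.any hasLongRun

-- ===== PRECONDITION & SPEC =====
def Spec_possibleTree (floor : List (List Int)) (out : Bool) : Prop := out = possibleTree_alt floor
instance (floor : List (List Int)) (out : Bool) : Decidable (Spec_possibleTree floor out) := by unfold Spec_possibleTree; infer_instance

-- ===== CLAIM (what is proved, stated in full; the proofs are below) =====
def Claim_equal_possibleTree : Prop := ∀ (floor : List (List Int)), Dom_possibleTree floor → Spec_possibleTree floor (possibleTree floor)

-- ===== LEMMAS AND PROOFS =====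

-- step function of A's inner fold
def pvStep (p : Int × Int) (n : Int) : Int × Int :=
  if n = 0 then (p.1, 0) else (max p.1 (p.2 + 1), p.2 + 1)

-- proof-side characterisation: a run exceeding 7 exists, carrying c already-seen cells
def hlrC (c : Int) : List Int → Bool
  | [] => false
  | n :: t => if n = 0 then hlrC 0 t else decide (c + 1 > 7) || hlrC (c + 1) t

lemma foldA_gt (f : List Int) : ∀ b c : Int, 0 ≤ c → c ≤ b →
    ((f.foldl pvStep (b, c)).1 > 7 ↔ (b > 7 ∨ hlrC c f = true)) := by
  induction f with
  | nil => intro b c _ _; simp [hlrC]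
  | cons n t ih =>
    intro b c hc hcb
    by_cases hn : n = 0
    · simp only [List.foldl_cons, pvStep, hn, if_true, hlrC]
      rw [ih b 0 le_rfl (le_trans hc hcb)]
    · simp only [List.foldl_cons, pvStep, hn, if_false, hlrC,
        Bool.or_eq_true, decide_eq_true_eq]
      rw [ih (max b (c + 1)) (c + 1) (by omega) (le_max_right _ _)]
      constructor
      · rintro (h | h)
        · rcases le_or_gt b (c + 1) with h1 | h1
          · right; left; omega
          · left; omega
        · right; right; exact h
      · rintro (h | h | h)
        · left; omega
        · left; omega
        · right; exact h

lemma hlrC_run (f : List Int) : ∀ c : Int, 0 ≤ c → c ≤ 7 →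
    hlrC c f = (decide (c + ((f.takeWhile (fun x => x ≠ 0)).length : Int) > 7)
      || hlrC 0 (f.drop ((f.takeWhile (fun x => x ≠ 0)).length))) := by
  induction f with
  | nil =>
    intro c _ hc7
    simp [hlrC]
    omega
  | cons n t ih =>
    intro c hc hc7
    by_cases hn : n = 0
    · subst hn
      simp [hlrC]
      intro h'
      omega
    · simp only [hlrC, hn, ite_false, List.takeWhile_cons, decide_eq_true_eq,
        if_pos hn, List.length_cons, List.drop_succ_cons]
      by_cases h8 : c + 1 > 7
      · have h1 : decide (c + 1 > 7) = true := by simpa using h8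
        have h2 : decide (c + (((t.takeWhile (fun x => x ≠ 0)).length + 1 : Nat) : Int) > 7)
            = true := by
          simp only [decide_eq_true_eq]; push_cast; omega
        rw [h1, h2]; simp
      · have h1 : decide (c + 1 > 7) = false := by simpa using h8
        rw [h1, Bool.false_or, ih (c + 1) (by omega) (by omega)]
        congr 1
        simp only [decide_eq_decide]
        push_cast
        omega

lemma hlrC_eq_hasLongRun : ∀ (f : List Int), hlrC 0 f = hasLongRun f
  | [] => by simp [hlrC, hasLongRun]
  | n :: t => by
    by_cases hn : n = 0
    · subst hn
      have := hlrC_eq_hasLongRun t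
      simp [hlrC, hasLongRun, this]
    · rw [hlrC_run (n :: t) 0 le_rfl (by omega)]
      have hrec := hlrC_eq_hasLongRun
        ((n :: t).drop (((n :: t).takeWhile (fun x => x ≠ 0)).length))
      simp only [hasLongRun, hn, dite_false]
      rw [hrec]
      congr 1
      simp only [decide_eq_decide]
      omega
termination_by f => f.length
decreasing_by
  · simp
  · simp [hn, List.length_drop]

lemma row_equiv (f : List Int) :
    ((f.foldl pvStep (0, 0)).1 > 7 ↔ hasLongRun f = true) := by
  rw [foldA_gt f 0 0 le_rfl le_rfl, hlrC_eq_hasLongRun]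
  constructor
  · rintro (h | h)
    · omega
    · exact h
  · exact Or.inr

lemma ports_eq (floor : List (List Int)) : possibleTree floor = possibleTree_alt floor := by
  induction floor with
  | nil => simp [possibleTree, possibleTree_alt]
  | cons f rest ih =>
    have hstep : (fun (p : Int × Int) n =>
        if n = 0 then (p.1, 0) else (max p.1 (p.2 + 1), p.2 + 1)) = pvStep := rfl
    simp only [possibleTree, possibleTree_alt, List.any_cons, hstep]
    by_cases h : (f.foldl pvStep (0, 0)).1 > 7
    · rw [if_pos h, (row_equiv f).mp h]; simp
    · rw [if_neg h]
      have hf : hasLongRun f = false := by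
        rcases Bool.eq_false_or_eq_true (hasLongRun f) with hb | hb
        · exact absurd ((row_equiv f).mpr hb) h
        · exact hb
      rw [hf, Bool.false_or]
      simpa [possibleTree_alt] using ih

-- ===== VERDICT (by name: the statement is the Claim_ definition above) =====
theorem possibleTree_spec : Claim_equal_possibleTree := by
  intro floor _
  unfold Spec_possibleTree
  exact ports_eq floor
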